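-- pv_equiv track=rewrite | github.com/InfluxGraph/influxgraph | graphite_influxdb/utils.py | calculate_interval
-- ===== SOURCE A (Python) =====
-- def calculate_interval(start_time, end_time, deltas=None):
--     """Calculates wanted data series interval according to start and end times
--
--     Returns interval in seconds
--     :param start_time: Start time in seconds from epoch
--     :param end_time: End time in seconds from epoch
--     :type start_time: int
--     :type end_time: int
--     :param deltas: Delta configuration to use. Defaults hardcoded if no
--     configuration is provided
--     :type deltas: dict(max time range of query in seconds: interval to use in seconds)
--
--     :rtype: int - *Interval in seconds*
--     """
--     time_delta = end_time - start_time
--     deltas = deltas if deltas else {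
--         # # 1 hour -> 1s
--         # 3600 : 1,
--         # # 1 day -> 30s
--         # 86400 : 30,
--         # 3 days -> 1min
--         259200 : 60,
--         # 7 days -> 5min
--         604800 : 300,
--         # 14 days -> 10min
--         1209600 : 600,
--         # 28 days -> 15min
--         2419200 : 900,
--         # 2 months -> 30min
--         4838400 : 1800,
--         # 4 months -> 1hour
--         9676800 : 3600,
--         # 12 months -> 3hours
--         31536000 : 7200,
--         # 4 years -> 12hours
--         126144000 : 43200,
--         }
--     for delta in sorted(deltas.keys()):
--         if time_delta <= delta:
--             return deltas[delta]
--     # 1 day default, or if time range > max configured (4 years default max)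
--     return 86400
-- ===== SOURCE B (Python) =====
-- def calculate_interval(start_time, end_time, deltas=None):
--     """Calculates wanted data series interval according to start and end times
--
--     Returns interval in seconds"""
--     time_delta = end_time - start_time
--     deltas = deltas if deltas else {
--         259200: 60,
--         604800: 300,
--         1209600: 600,
--         2419200: 900,
--         4838400: 1800,
--         9676800: 3600,
--         31536000: 7200,
--         126144000: 43200,
--         }
--     # single pass over the items: running minimum of the covering thresholds
--     best = None
--     for k, v in deltas.items():
--         if time_delta <= k and (best is None or k < best[0]):
--             best = (k, v)
--     return 86400 if best is None else best[1]
-- ===== Notes on version B (the rewrite author's own statement) =====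
-- stated objective: faster
-- what changed: Replaced the sort-then-scan over the threshold keys by a single unsorted pass over the items that maintains a running minimum covering (threshold, interval) pair, returning its interval (or 86400 if none covers).
import Mathlib
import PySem

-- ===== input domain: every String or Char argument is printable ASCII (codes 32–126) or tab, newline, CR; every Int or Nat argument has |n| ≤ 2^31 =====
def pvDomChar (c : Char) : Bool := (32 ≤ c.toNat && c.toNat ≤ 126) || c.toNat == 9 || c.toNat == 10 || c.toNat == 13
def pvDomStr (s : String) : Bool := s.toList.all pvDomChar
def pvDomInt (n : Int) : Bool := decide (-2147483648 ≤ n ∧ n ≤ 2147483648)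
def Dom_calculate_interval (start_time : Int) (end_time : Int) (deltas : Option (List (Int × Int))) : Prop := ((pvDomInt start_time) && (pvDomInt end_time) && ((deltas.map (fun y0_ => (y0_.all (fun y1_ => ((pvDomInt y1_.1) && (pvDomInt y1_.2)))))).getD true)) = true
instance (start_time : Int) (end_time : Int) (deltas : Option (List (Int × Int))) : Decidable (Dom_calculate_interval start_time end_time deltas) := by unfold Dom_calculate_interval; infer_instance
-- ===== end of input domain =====

-- B replaces A's sort-then-scan over the threshold keys by one unsorted pass over the
-- items keeping a running minimum covering (threshold, interval) pair (measured faster).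

-- ===== PORT A =====
-- the default deltas dict literal (shared text of both Pythons)
def pvDefaultDeltas : List (Int × Int) :=
  [(259200, 60), (604800, 300), (1209600, 600), (2419200, 900),
   (4838400, 1800), (9676800, 3600), (31536000, 7200), (126144000, 43200)]

-- `deltas if deltas else {…}`: None and the empty dict fall back to the default
def pvEffDeltas (deltas : Option (List (Int × Int))) : PySem.Dict Int Int :=
  PySem.Dict.ofList (match deltas with
    | some (p :: rest) => p :: rest
    | _ => pvDefaultDeltas)

-- `for delta in sorted(deltas.keys()): if time_delta <= delta: return deltas[delta]` / `return 86400`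
-- (deltas[delta] is ported as getD _ 0; delta is always a key of the dict, so no KeyError arises)
def pvScanKeys (d : PySem.Dict Int Int) (td : Int) : List Int → Int
  | [] => 86400
  | k :: rest => if td ≤ k then d.getD k 0 else pvScanKeys d td rest

def calculate_interval (start_time : Int) (end_time : Int) (deltas : Option (List (Int × Int))) : Int :=
  let time_delta := end_time - start_time
  let d := pvEffDeltas deltas
  pvScanKeys d time_delta (PySem.List.sorted d.keys (fun x => x) false)

-- ===== PORT B =====
-- loop body: `if time_delta <= k and (best is None or k < best[0]): best = (k, v)`
def pvBestStep (td : Int) (best : Option (Int × Int)) (p : Int × Int) : Option (Int × Int) :=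
  if td ≤ p.1 then
    match best with
    | none => some p
    | some q => if p.1 < q.1 then some p else best
  else best

def calculate_interval_alt (start_time : Int) (end_time : Int) (deltas : Option (List (Int × Int))) : Int :=
  let time_delta := end_time - start_time
  let d := pvEffDeltas deltas
  match d.items.foldl (pvBestStep time_delta) none with
  | none => 86400
  | some p => p.2

-- ===== PRECONDITION & SPEC =====
def Spec_calculate_interval (start_time : Int) (end_time : Int) (deltas : Option (List (Int × Int))) (out : Int) : Prop := out = calculate_interval_alt start_time end_time deltas
instance (start_time : Int) (end_time : Int) (deltas : Option (List (Int × Int))) (out : Int) : Decidable (Spec_calculate_interval start_time end_time deltas out) := by unfold Spec_calculate_interval; infer_instance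

-- ===== CLAIM (what is proved, stated in full; the proofs are below) =====
def Claim_equal_calculate_interval : Prop := ∀ (start_time : Int) (end_time : Int) (deltas : Option (List (Int × Int))), Dom_calculate_interval start_time end_time deltas → Spec_calculate_interval start_time end_time deltas (calculate_interval start_time end_time deltas)

-- ===== LEMMAS AND PROOFS =====

-- on a ≤-sorted key list, A's first-match scan returns the head of the covering sublist
theorem pvScanKeys_eq_filter_head (d : PySem.Dict Int Int) (td : Int) (s : List Int)
    (hs : s.Pairwise (· ≤ ·)) :
    pvScanKeys d td s =
      match s.filter (fun t => td ≤ t) with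
      | [] => 86400
      | m :: _ => d.getD m 0 := by
  induction s with
  | nil => rfl
  | cons k rest ih =>
    rcases List.pairwise_cons.mp hs with ⟨_, hrest⟩
    by_cases h : td ≤ k
    · simp [pvScanKeys, h]
    · simp [pvScanKeys, h, ih hrest]

-- one step: a `none` result means the accumulator was none and p does not cover
theorem pvStep_none (td : Int) (acc : Option (Int × Int)) (p : Int × Int)
    (h : pvBestStep td acc p = none) : acc = none ∧ ¬ td ≤ p.1 := by
  cases acc with
  | none =>
    by_cases hc : td ≤ p.1
    · simp [pvBestStep, hc] at h
    · exact ⟨rfl, hc⟩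
  | some a =>
    by_cases hc : td ≤ p.1
    · simp only [pvBestStep, hc, ite_true] at h
      split_ifs at h <;> simp at h
    · simp [pvBestStep, hc] at h

-- one step: a `some` result is the new pair (which covers) or the old accumulator
theorem pvStep_some (td : Int) (acc : Option (Int × Int)) (q r : Int × Int)
    (h : pvBestStep td acc q = some r) : (r = q ∧ td ≤ q.1) ∨ acc = some r := by
  cases acc with
  | none =>
    by_cases hc : td ≤ q.1
    · simp [pvBestStep, hc] at h; exact Or.inl ⟨h.symm, hc⟩
    · simp [pvBestStep, hc] at h
  | some a =>
    by_cases hc : td ≤ q.1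
    · simp only [pvBestStep, hc, ite_true] at h
      split_ifs at h with h2
      · exact Or.inl ⟨(Option.some_inj.mp h).symm, hc⟩
      · exact Or.inr h
    · simp only [pvBestStep, hc, ite_false] at h
      exact Or.inr h

-- one step never raises the accumulator's key
theorem pvStep_key (td : Int) (acc : Option (Int × Int)) (q a : Int × Int)
    (ha : acc = some a) : ∃ b, pvBestStep td acc q = some b ∧ b.1 ≤ a.1 := by
  subst ha
  by_cases hc : td ≤ q.1
  · simp only [pvBestStep, hc, ite_true]
    split_ifs with h2
    · exact ⟨q, rfl, le_of_lt h2⟩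
    · exact ⟨a, rfl, le_refl _⟩
  · exact ⟨a, by simp [pvBestStep, hc], le_refl _⟩

-- after a covering pair, the accumulator key is ≤ that pair's key
theorem pvStep_cover (td : Int) (acc : Option (Int × Int)) (q : Int × Int)
    (hc : td ≤ q.1) : ∃ b, pvBestStep td acc q = some b ∧ b.1 ≤ q.1 := by
  cases acc with
  | none => exact ⟨q, by simp [pvBestStep, hc], le_refl _⟩
  | some a =>
    simp only [pvBestStep, hc, ite_true]
    split_ifs with h2
    · exact ⟨q, rfl, le_refl _⟩
    · exact ⟨a, rfl, by omega⟩

-- if B's fold ends with no best pair, it started with none and nothing in l covers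
theorem pvFold_none (td : Int) : ∀ (l : List (Int × Int)) (acc : Option (Int × Int)),
    l.foldl (pvBestStep td) acc = none → acc = none ∧ ∀ q ∈ l, ¬ td ≤ q.1 := by
  intro l
  induction l with
  | nil => intro acc h; exact ⟨h, by simp⟩
  | cons p rest ih =>
    intro acc h
    rcases ih (pvBestStep td acc p) h with ⟨hstep, hrest⟩
    rcases pvStep_none td acc p hstep with ⟨hacc, hp⟩
    refine ⟨hacc, ?_⟩
    intro q hq
    rcases List.mem_cons.mp hq with rfl | hq
    · exact hp
    · exact hrest q hq

-- if B's fold ends with best = p, then p is the accumulator or a covering pair of l,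
-- p.1 is ≤ the incoming accumulator's key, and p.1 is ≤ every covering key of l
theorem pvFold_some (td : Int) : ∀ (l : List (Int × Int)) (acc : Option (Int × Int)) (p : Int × Int),
    l.foldl (pvBestStep td) acc = some p →
      (acc = some p ∨ (p ∈ l ∧ td ≤ p.1)) ∧
      (∀ a, acc = some a → p.1 ≤ a.1) ∧
      (∀ q ∈ l, td ≤ q.1 → p.1 ≤ q.1) := by
  intro l
  induction l with
  | nil =>
    intro acc p h
    simp only [List.foldl_nil] at h
    exact ⟨Or.inl h, fun a ha => by rw [h] at ha; cases ha; exact le_refl _, by simp⟩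
  | cons q rest ih =>
    intro acc p h
    simp only [List.foldl_cons] at h
    rcases ih (pvBestStep td acc q) p h with ⟨hmem, hacc, hcov⟩
    refine ⟨?_, ?_, ?_⟩
    · rcases hmem with hs | hm
      · rcases pvStep_some td acc q p hs with ⟨rfl, hqc⟩ | hkeep
        · exact Or.inr ⟨List.mem_cons_self, hqc⟩
        · exact Or.inl hkeep
      · exact Or.inr ⟨List.mem_cons_of_mem _ hm.1, hm.2⟩
    · intro a ha
      rcases pvStep_key td acc q a ha with ⟨b, hb, hba⟩
      exact le_trans (hacc b hb) hba
    · intro r hr hrc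
      rcases List.mem_cons.mp hr with rfl | hr
      · rcases pvStep_cover td acc r hrc with ⟨b, hb, hbr⟩
        exact le_trans (hacc b hb) hbr
      · exact hcov r hr hrc

-- core equality, for any dict with nodup keys
theorem pv_core (d : PySem.Dict Int Int) (td : Int) (hnd : d.keys.Nodup) :
    pvScanKeys d td (PySem.List.sorted d.keys (fun x => x) false) =
      match d.items.foldl (pvBestStep td) none with
      | none => 86400
      | some p => p.2 := by
  set s := PySem.List.sorted d.keys (fun x => x) false with hsdef
  have hperm : s.Perm d.keys := PySem.List.sorted_perm d.keys (fun x => x) false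
  have hpw : s.Pairwise (· ≤ ·) := PySem.List.sorted_pairwise d.keys (fun x => x)
  rw [pvScanKeys_eq_filter_head d td s hpw]
  rcases hf : d.items.foldl (pvBestStep td) none with _ | p
  · -- nothing covers: the sorted filter is empty
    rcases pvFold_none td d.items none hf with ⟨-, hnone⟩
    have : s.filter (fun t => td ≤ t) = [] := by
      rw [List.filter_eq_nil_iff]
      intro t ht
      have htk : t ∈ d.keys := hperm.mem_iff.mp ht
      rcases List.mem_map.mp htk with ⟨q, hq, rfl⟩
      simpa using hnone q hq
    simp [this]
  · -- a minimal covering pair p: the sorted filter's head is p.1 and d.getD p.1 0 = p.2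
    rcases pvFold_some td d.items none p hf with ⟨hmem, -, hcov⟩
    rcases hmem with h | ⟨hpl, hpc⟩
    · exact absurd h (by simp)
    have hp1k : p.1 ∈ d.keys := List.mem_map.mpr ⟨p, hpl, rfl⟩
    have hp1s : p.1 ∈ s.filter (fun t => td ≤ t) := by
      rw [List.mem_filter]
      exact ⟨hperm.mem_iff.mpr hp1k, by simpa using hpc⟩
    rcases hfe : s.filter (fun t => td ≤ t) with _ | ⟨m, t⟩
    · rw [hfe] at hp1s; simp at hp1s
    · -- head m of the sorted covering list is its minimum; p.1 is minimal too, so m = p.1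
      have hms : m ∈ s.filter (fun t => td ≤ t) := by rw [hfe]; exact List.mem_cons_self
      have hmk : m ∈ d.keys := hperm.mem_iff.mp (List.mem_filter.mp hms).1
      have hmc : td ≤ m := by have := (List.mem_filter.mp hms).2; simpa using this
      rcases List.mem_map.mp hmk with ⟨q, hq, rfl⟩
      have h1 : p.1 ≤ q.1 := hcov q hq hmc
      have h2 : q.1 ≤ p.1 := by
        have hpwf : (s.filter (fun t => td ≤ t)).Pairwise (· ≤ ·) := hpw.filter _
        rw [hfe] at hpwf hp1s
        rcases List.mem_cons.mp hp1s with heq | hp1t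
        · omega
        · exact (List.pairwise_cons.mp hpwf).1 p.1 hp1t
      have hmp : q.1 = p.1 := le_antisymm h2 h1
      rw [hmp]
      exact PySem.Dict.getD_of_mem_items d (by simpa using hpl) hnd 0

-- ===== VERDICT (by name: the statement is the Claim_ definition above) =====
theorem calculate_interval_spec : Claim_equal_calculate_interval := by
  intro start_time end_time deltas _
  unfold Spec_calculate_interval calculate_interval calculate_interval_alt
  exact pv_core (pvEffDeltas deltas) (end_time - start_time)
    (PySem.Dict.nodup_keys_ofList _)
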